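-- pv_equiv track=rewrite | github.com/DavidDirnberger/PhotonFrame-VideoKit | src/merge.py | _strip_global_filters_if_complex
-- ===== SOURCE A (Python) =====
-- from typing import Any, Dict, List, Optional, Sequence, Tuple, Union, cast
--
-- def _strip_global_filters_if_complex(cmd: List[str]) -> List[str]:
--     """Entfernt -vf/-filter:v (und optional -af/-filter:a), wenn -filter_complex benutzt wird."""
--     if "-filter_complex" not in cmd:
--         return cmd
--
--     def _rm(opt: str) -> None:
--         while True:
--             try:
--                 i = cmd.index(opt)
--                 # entferne Option + Wert sofern vorhanden
--                 del cmd[i : i + 2]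
--             except ValueError:
--                 break
--
--     for opt in ("-vf", "-filter:v", "-af", "-filter:a"):
--         _rm(opt)
--     return cmd
-- ===== SOURCE B (Python) =====
-- def _strip_global_filters_if_complex(cmd):
--     """Entfernt -vf/-filter:v (und optional -af/-filter:a), wenn -filter_complex benutzt wird."""
--     if "-filter_complex" not in cmd:
--         return cmd
--     for opt in ("-vf", "-filter:v", "-af", "-filter:a"):
--         out = []
--         it = iter(cmd)
--         for tok in it:
--             if tok == opt:
--                 next(it, None)  # drop the option's value if present
--             else:
--                 out.append(tok)
--         cmd = out
--     return cmd
-- ===== Notes on version B (the rewrite author's own statement) =====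
-- stated objective: alternative
-- what changed: Replaces A's repeated cmd.index + del slice loop (rescanning from the start after every deletion) with one linear skip-pass per option that drops each matched option together with its following value while building a new list; on inputs with few matching options both are effectively linear.
import Mathlib
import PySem

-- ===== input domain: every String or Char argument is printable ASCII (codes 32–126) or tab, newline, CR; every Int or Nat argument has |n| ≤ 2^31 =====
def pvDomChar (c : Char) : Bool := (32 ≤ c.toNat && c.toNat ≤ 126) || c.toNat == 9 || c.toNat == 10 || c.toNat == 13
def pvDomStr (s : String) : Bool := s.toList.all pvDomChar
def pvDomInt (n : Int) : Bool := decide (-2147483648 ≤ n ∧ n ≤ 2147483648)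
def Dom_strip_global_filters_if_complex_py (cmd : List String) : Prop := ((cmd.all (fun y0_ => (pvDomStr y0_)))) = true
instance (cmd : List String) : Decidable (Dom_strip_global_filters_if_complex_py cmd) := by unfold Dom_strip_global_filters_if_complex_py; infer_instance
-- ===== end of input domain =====

-- B replaces A's repeated index/del-slice rescans with one linear skip-pass per option (alternative algorithm);
-- A mutates its argument in place, B does not — the equivalence proved here is about the return value only.

-- ===== PORT A =====
-- A's `_rm`: while True: i = cmd.index(opt); del cmd[i:i+2]  — until ValueError.
-- `del cmd[i:i+2]` is transliterated as take i ++ drop (i+2) (exact for 0 ≤ i < len).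
def pvRmA (opt : String) (cmd : List String) : List String :=
  match h : PySem.List.index? cmd opt with
  | none => cmd
  | some i => pvRmA opt (cmd.take i ++ cmd.drop (i + 2))
termination_by cmd.length
decreasing_by
  obtain ⟨hk, -, -⟩ := PySem.List.getElem_of_index?_eq_some h
  simp [List.length_take, List.length_drop]
  omega

def strip_global_filters_if_complex_py (cmd : List String) : List String :=
  if "-filter_complex" ∈ cmd then
    ["-vf", "-filter:v", "-af", "-filter:a"].foldl (fun c opt => pvRmA opt c) cmd
  else cmd

-- ===== PORT B =====
-- B's inner for-loop over the iterator: keep tok unless it equals opt, in which case also drop the next token.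
def pvSkip (opt : String) : List String → List String
  | [] => []
  | x :: xs => if x = opt then pvSkip opt xs.tail else x :: pvSkip opt xs
termination_by l => l.length
decreasing_by
  · cases xs <;> simp
  · simp only [List.length_cons]; omega

def strip_global_filters_if_complex_py_alt (cmd : List String) : List String :=
  if "-filter_complex" ∈ cmd then
    ["-vf", "-filter:v", "-af", "-filter:a"].foldl (fun c opt => pvSkip opt c) cmd
  else cmd

-- ===== PRECONDITION & SPEC =====
def Spec_strip_global_filters_if_complex_py (cmd : List String) (out : List String) : Prop := out = strip_global_filters_if_complex_py_alt cmd
instance (cmd : List String) (out : List String) : Decidable (Spec_strip_global_filters_if_complex_py cmd out) := by unfold Spec_strip_global_filters_if_complex_py; infer_instance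

-- ===== CLAIM (what is proved, stated in full; the proofs are below) =====
def Claim_equal_strip_global_filters_if_complex_py : Prop := ∀ (cmd : List String), Dom_strip_global_filters_if_complex_py cmd → Spec_strip_global_filters_if_complex_py cmd (strip_global_filters_if_complex_py cmd)

-- ===== LEMMAS AND PROOFS =====

theorem pvRmA_eq_of_none {opt : String} {cmd : List String}
    (hidx : PySem.List.index? cmd opt = none) : pvRmA opt cmd = cmd := by
  rw [pvRmA]
  split
  · rfl
  · rename_i i h; rw [hidx] at h; exact absurd h (by simp)

theorem pvRmA_eq_of_some {opt : String} {cmd : List String} {i : Nat}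
    (hidx : PySem.List.index? cmd opt = some i) :
    pvRmA opt cmd = pvRmA opt (cmd.take i ++ cmd.drop (i + 2)) := by
  rw [pvRmA]
  split
  · rename_i h; rw [hidx] at h; exact absurd h (by simp)
  · rename_i j h; rw [hidx] at h; cases h; rfl

theorem pvRmA_of_not_mem {opt : String} {cmd : List String} (h : opt ∉ cmd) :
    pvRmA opt cmd = cmd :=
  pvRmA_eq_of_none ((PySem.List.index?_eq_none_iff cmd opt).mpr h)

theorem pvRmA_cons_self (opt : String) (xs : List String) :
    pvRmA opt (opt :: xs) = pvRmA opt xs.tail := by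
  rw [pvRmA_eq_of_some (PySem.List.index?_cons_self opt xs)]
  cases xs <;> simp

theorem pvRmA_cons_of_ne {opt x : String} (hne : x ≠ opt) (xs : List String) :
    pvRmA opt (x :: xs) = x :: pvRmA opt xs := by
  induction hlen : xs.length using Nat.strong_induction_on generalizing xs with
  | _ n ih =>
  cases hidx : PySem.List.index? xs opt with
  | none =>
    have hmem : opt ∉ xs := (PySem.List.index?_eq_none_iff xs opt).mp hidx
    have hmem' : opt ∉ x :: xs := by simp [hmem, Ne.symm hne]
    rw [pvRmA_of_not_mem hmem', pvRmA_of_not_mem hmem]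
  | some i =>
    obtain ⟨hk, -, -⟩ := PySem.List.getElem_of_index?_eq_some hidx
    have hidx' : PySem.List.index? (x :: xs) opt = some (i + 1) := by
      rw [PySem.List.index?_cons_of_ne xs hne, hidx]; rfl
    have hstep : pvRmA opt (x :: xs) = pvRmA opt (x :: (xs.take i ++ xs.drop (i + 1 + 1))) := by
      rw [pvRmA_eq_of_some hidx']
      simp [List.take_succ_cons, List.drop_succ_cons]
    have hlt : (xs.take i ++ xs.drop (i + 1 + 1)).length < n := by
      subst hlen
      simp [List.length_take, List.length_drop]
      omega
    rw [hstep, ih _ hlt _ rfl, pvRmA_eq_of_some hidx]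

theorem pvRmA_eq_pvSkip (opt : String) (cmd : List String) :
    pvRmA opt cmd = pvSkip opt cmd := by
  induction hlen : cmd.length using Nat.strong_induction_on generalizing cmd with
  | _ n ih =>
  cases cmd with
  | nil => rw [pvRmA_of_not_mem (by simp)]; rw [pvSkip]
  | cons x xs =>
    rw [pvSkip]
    by_cases hx : x = opt
    · subst hx
      rw [pvRmA_cons_self, if_pos rfl]
      exact ih _ (by subst hlen; cases xs <;> simp) _ rfl
    · rw [pvRmA_cons_of_ne hx, if_neg hx]
      rw [ih _ (by subst hlen; simp) _ rfl]

-- ===== VERDICT (by name: the statement is the Claim_ definition above) =====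
theorem strip_global_filters_if_complex_py_spec : Claim_equal_strip_global_filters_if_complex_py := by
  intro cmd _
  unfold Spec_strip_global_filters_if_complex_py
  unfold strip_global_filters_if_complex_py strip_global_filters_if_complex_py_alt
  split
  · simp only [List.foldl_cons, List.foldl_nil, pvRmA_eq_pvSkip]
  · rfl
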